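-- pv_equiv track=rewrite | github.com/kodsnack/advent_of_code_2017 | meldanya-python3/day6/day6.py | infinite_loop
-- ===== SOURCE A (Python) =====
-- def infinite_loop(bank):
--     seen = set()
--     banks = []
--     steps = 0
--     while True:
--         seen.add(tuple(bank))
--         banks.append(bank[:])
--
--         n = max(bank)
--         i = bank.index(n)
--         bank[i] = 0
--
--         while n > 0:
--             i = (i + 1) % len(bank)
--             bank[i] += 1
--             n -= 1
--         steps += 1
--         if tuple(bank) in seen:
--             banks.append(bank[:])
--             break
--     return banks, steps
-- ===== SOURCE B (Python) =====
-- def infinite_loop(bank):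
--     seen = {}
--     banks = []
--     L = len(bank)
--     while tuple(bank) not in seen:
--         seen[tuple(bank)] = True
--         banks.append(list(bank))
--         n = max(bank)
--         i = bank.index(n)
--         nb = list(bank)
--         nb[i] = 0
--         if n > 0:
--             q, r = divmod(n, L)
--             if q:
--                 nb = [v + q for v in nb]
--             a, b = i + 1, i + 1 + r
--             if b <= L:
--                 nb[a:b] = [v + 1 for v in nb[a:b]]
--             else:
--                 nb[a:L] = [v + 1 for v in nb[a:L]]
--                 nb[0:b - L] = [v + 1 for v in nb[0:b - L]]
--         bank = nb
--     banks.append(list(bank))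
--     return banks, len(banks) - 1
-- ===== Notes on version B (the rewrite author's own statement) =====
-- stated objective: alternative
-- what changed: B replaces A's inner while-loop that hands out the removed blocks one at a time (O(max value) per redistribution step) by a divmod closed form: every position gains n//len(bank) and the first n%len(bank) positions after the source (at most two contiguous slices) gain one more; the outer loop is a dict-keyed 'while state unseen' loop that rebuilds the list instead of mutating it (A mutates its argument in place, B does not; the return value is identical).
import Mathlib
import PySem

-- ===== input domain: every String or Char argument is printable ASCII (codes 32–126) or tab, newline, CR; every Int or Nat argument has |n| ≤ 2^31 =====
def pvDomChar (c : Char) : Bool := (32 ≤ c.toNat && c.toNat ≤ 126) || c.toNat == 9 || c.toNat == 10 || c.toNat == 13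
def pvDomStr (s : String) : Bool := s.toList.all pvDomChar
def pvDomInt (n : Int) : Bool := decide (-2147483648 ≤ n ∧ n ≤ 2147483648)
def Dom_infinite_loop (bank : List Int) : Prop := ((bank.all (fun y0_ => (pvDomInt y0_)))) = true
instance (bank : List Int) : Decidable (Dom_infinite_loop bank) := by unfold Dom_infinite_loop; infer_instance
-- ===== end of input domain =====

-- B replaces A's one-block-at-a-time redistribution loop by a divmod closed form (everyone gains
-- n // len, the first n % len positions after the source gain one more, via at most two slices) —
-- an alternative algorithm of comparable measured cost; the equivalence is about the RETURN value
-- only: Python A mutates its argument list in place, B does not.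

-- Fuel bound for the 'while True' loop (same scaffolding for both ports): every reachable state has
-- entries in [-S, S + L], so a repeat occurs within (2*S + L + 2)^L steps.
def pvFuel (bank : List Int) : Nat :=
  (2 * bank.foldl (fun a x => a + x.natAbs) 0 + bank.length + 2) ^ bank.length + 2

-- ===== PORT A =====
-- inner 'while n > 0' loop of A: add 1 at (i+1)%len repeatedly, n times
def pvDistribA (n : Nat) (i : Nat) (bank : List Int) : List Int :=
  match n with
  | 0 => bank
  | Nat.succ m =>
    let i' := (i + 1) % bank.length
    pvDistribA m i' (bank.set i' (bank.getD i' 0 + 1))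

def pvLoopA (fuel : Nat) (seen : PySem.Set (List Int)) (banks : List (List Int))
    (steps : Int) (bank : List Int) : List (List Int) × Int :=
  match fuel with
  | 0 => (banks, steps)
  | Nat.succ f =>
    let seen := PySem.Set.add seen bank
    let banks := banks ++ [bank]
    match PySem.List.max? bank (fun x => x) with
    | none => (banks, steps)      -- max([]) raises ValueError: excluded by Pre_
    | some n =>
      match PySem.List.index? bank n with
      | none => (banks, steps)    -- unreachable: the max is a member
      | some i =>
        let bank := bank.set i 0
        let bank := pvDistribA n.toNat i bank
        let steps := steps + 1
        if PySem.Set.contains seen bank then (banks ++ [bank], steps)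
        else pvLoopA f seen banks steps bank

def infinite_loop (bank : List Int) : List (List Int) × Int :=
  pvLoopA (pvFuel bank) PySem.Set.empty [] 0 bank

-- ===== PORT B =====
-- nb[a:b] = [v + 1 for v in nb[a:b]] — slice assignment of equal length (used with 0 ≤ a ≤ b ≤ len,
-- where it is exactly take/replace/drop)
def pvBump (nb : List Int) (a b : Nat) : List Int :=
  nb.take a ++ (PySem.List.slice nb (some (a : Int)) (some (b : Int))).map (· + 1) ++ nb.drop b

-- one redistribution step, closed form: bank[i] drops to 0, everyone gains n // L and the first
-- n % L positions after i (at most two contiguous slices) gain one more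
def pvStepB (bank : List Int) : List Int :=
  match PySem.List.max? bank (fun x => x) with
  | none => bank                 -- max([]) raises in B too: excluded by Pre_
  | some n =>
    match PySem.List.index? bank n with
    | none => bank               -- unreachable
    | some i =>
      let L := bank.length
      let nb := bank.set i 0
      if n > 0 then
        let q := PySem.Int.floordiv n (L : Int)
        let r := PySem.Int.mod n (L : Int)
        let nb := if q ≠ 0 then nb.map (· + q) else nb
        let a := i + 1
        let b := i + 1 + r.toNat
        if b ≤ L then pvBump nb a b
        else pvBump (pvBump nb a L) 0 (b - L)
      else nb


def pvLoopB (fuel : Nat) (seen : PySem.Dict (List Int) Bool) (banks : List (List Int))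
    (bank : List Int) : List (List Int) × Int :=
  if seen.contains bank then
    let banks := banks ++ [bank]
    (banks, (banks.length : Int) - 1)
  else
    match fuel with
    | 0 => (banks, (banks.length : Int))   -- fuel exhausted: unreachable for the stated bound
    | Nat.succ f => pvLoopB f (seen.insert bank true) (banks ++ [bank]) (pvStepB bank)

def infinite_loop_alt (bank : List Int) : List (List Int) × Int :=
  pvLoopB (pvFuel bank) PySem.Dict.empty [] bank

-- ===== PRECONDITION & SPEC =====
-- Pre_ excludes only the empty list, on which A raises ValueError (max of an empty sequence).
def Pre_infinite_loop (bank : List Int) : Prop := bank ≠ []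
instance (bank : List Int) : Decidable (Pre_infinite_loop bank) := by unfold Pre_infinite_loop; infer_instance
def pvWitness_infinite_loop : List Int := [0, 2, 7, 0]

def Spec_infinite_loop (bank : List Int) (out : List (List Int) × Int) : Prop := out = infinite_loop_alt bank
instance (bank : List Int) (out : List (List Int) × Int) : Decidable (Spec_infinite_loop bank out) := by unfold Spec_infinite_loop; infer_instance

-- ===== CLAIM (what is proved, stated in full; the proofs are below) =====
def Claim_equal_infinite_loop : Prop := ∀ (bank : List Int), Dom_infinite_loop bank → Pre_infinite_loop bank → Spec_infinite_loop bank (infinite_loop bank)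

-- ===== LEMMAS AND PROOFS =====

theorem pvDistribA_length (n : Nat) : ∀ (i : Nat) (b : List Int),
    (pvDistribA n i b).length = b.length := by
  induction n with
  | zero => intro i b; simp [pvDistribA]
  | succ m ih => intro i b; simp [pvDistribA, ih]

-- how many of the n one-block additions starting after position i land on position j
theorem pv_count_mod (L d : Nat) (hL : 0 < L) (hd : d < L) :
    ∀ n : Nat, (List.range n).countP (fun t => decide (t % L = d)) =
      n / L + (if d < n % L then 1 else 0) := by
  intro n
  induction n with
  | zero => simp
  | succ m ih =>
    rw [List.range_succ, List.countP_append, ih]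
    have hqr := Nat.div_add_mod m L
    have hlt : m % L < L := Nat.mod_lt _ hL
    rcases Nat.lt_or_ge (m % L + 1) L with h | h
    · have h1 : (m + 1) % L = m % L + 1 := by
        conv_lhs => rw [← hqr]
        rw [Nat.add_assoc, Nat.mul_add_mod, Nat.mod_eq_of_lt h]
      have h2 : (m + 1) / L = m / L := by
        conv_lhs => rw [← hqr]
        rw [Nat.add_assoc, Nat.mul_add_div hL, Nat.div_eq_of_lt h, Nat.add_zero]
      rw [h1, h2]
      simp only [List.countP_cons, List.countP_nil]
      split_ifs <;> simp_all <;> omega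
    · have hEq : m % L + 1 = L := by omega
      have h1 : (m + 1) % L = 0 := by
        conv_lhs => rw [← hqr]
        rw [Nat.add_assoc, hEq, ← Nat.mul_succ, Nat.mul_mod_right]
      have h2 : (m + 1) / L = m / L + 1 := by
        conv_lhs => rw [← hqr]
        rw [Nat.add_assoc, hEq, ← Nat.mul_succ, Nat.mul_div_cancel_left _ hL]
      rw [h1, h2]
      simp only [List.countP_cons, List.countP_nil]
      split_ifs <;> simp_all <;> omega

-- x % L for x < 2L, written without %
theorem pv_small_mod (L x : Nat) (hL : 0 < L) (hx : x < 2 * L) :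
    x % L = if x < L then x else x - L := by
  split_ifs with hc
  · exact Nat.mod_eq_of_lt hc
  · conv_lhs => rw [show x = x - L + L by omega]
    rw [Nat.add_mod_right, Nat.mod_eq_of_lt (by omega)]

-- the t-th added block (t = 0,1,…) lands on position j iff t ≡ j - i - 1 (mod L)
theorem pv_hit_iff (L i j t : Nat) (hi : i < L) (hj : j < L) :
    ((i + 1 + t) % L = j) ↔ (t % L = (j + L - 1 - i) % L) := by
  have hL : 0 < L := by omega
  have ht : t % L < L := Nat.mod_lt _ hL
  have e1 : (i + 1 + t) % L = (i + 1 + t % L) % L := by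
    conv_lhs => rw [← Nat.div_add_mod t L]
    rw [show i + 1 + (L * (t / L) + t % L) = i + 1 + t % L + (t / L) * L by ring,
      Nat.add_mul_mod_self_right]
  rw [e1, pv_small_mod L (i + 1 + t % L) hL (by omega),
    pv_small_mod L (j + L - 1 - i) hL (by omega)]
  split_ifs <;> omega


-- pointwise description of A's inner loop: position j gains one block per hit
theorem pv_distrib_spec : ∀ (n i : Nat) (b : List Int) (j : Nat), j < b.length →
    (pvDistribA n i b)[j]? =
      some (b.getD j 0 +
        ((List.range n).countP (fun t => decide ((i + 1 + t) % b.length = j)) : Int)) := by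
  intro n
  induction n with
  | zero =>
    intro i b j hj
    simp [pvDistribA, List.getElem?_eq_getElem hj]
  | succ m ih =>
    intro i b j hj
    have hL : 0 < b.length := by omega
    have hi' : (i + 1) % b.length < b.length := Nat.mod_lt _ hL
    show (pvDistribA m ((i + 1) % b.length)
        (b.set ((i + 1) % b.length) (b.getD ((i + 1) % b.length) 0 + 1)))[j]? = _
    rw [ih ((i + 1) % b.length) _ j (by simpa using hj)]
    simp only [List.length_set]
    have hset : (b.set ((i + 1) % b.length) (b.getD ((i + 1) % b.length) 0 + 1)).getD j 0
        = (if (i + 1) % b.length = j then 1 else 0) + b.getD j 0 := by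
      rw [List.getD_eq_getElem _ 0 (by simpa using hj), List.getD_eq_getElem b 0 hj,
        List.getElem_set]
      split_ifs with hc
      · subst hc; rw [List.getD_eq_getElem b 0 hi']; ring
      · ring
    have e2 : ∀ t : Nat, (i + 1 + (t + 1)) % b.length
        = ((i + 1) % b.length + 1 + t) % b.length := by
      intro t
      rw [show (i + 1) % b.length + 1 + t = (i + 1) % b.length + (1 + t) by ring,
        Nat.mod_add_mod, show i + 1 + (1 + t) = i + 1 + (t + 1) by ring]
    have hcnt : (List.range (m + 1)).countP
          (fun t => decide ((i + 1 + t) % b.length = j)) =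
        (List.range m).countP
          (fun t => decide (((i + 1) % b.length + 1 + t) % b.length = j)) +
        (if (i + 1) % b.length = j then 1 else 0) := by
      rw [List.range_succ_eq_map, List.countP_cons, List.countP_map]
      rw [List.countP_congr
        (q := fun t => decide (((i + 1) % b.length + 1 + t) % b.length = j))
        (fun t _ => by
          simp only [Function.comp_apply, decide_eq_true_eq, Nat.succ_eq_add_one]
          rw [e2 t])]
      simp
    rw [hcnt, hset]
    congr 1
    push_cast
    split_ifs <;> ring

theorem pvBump_length (nb : List Int) (a b : Nat) (hab : a ≤ b) (hbl : b ≤ nb.length) :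
    (pvBump nb a b).length = nb.length := by
  simp [pvBump, PySem.List.slice_natCast]
  omega

theorem pvBump_getElem? (nb : List Int) (a b j : Nat) (hab : a ≤ b) (hbl : b ≤ nb.length)
    (hj : j < nb.length) :
    (pvBump nb a b)[j]? = some (nb.getD j 0 + if a ≤ j ∧ j < b then 1 else 0) := by
  unfold pvBump
  rw [PySem.List.slice_natCast]
  have hlt : (nb.take a).length = a := by simp; omega
  have hlm : (((nb.drop a).take (b - a)).map (· + 1)).length = b - a := by simp; omega
  rcases Nat.lt_or_ge j a with h1 | h1
  · rw [List.getElem?_append_left (by simp [hlt, hlm]; omega),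
      List.getElem?_append_left (by omega : j < (nb.take a).length),
      List.getElem?_take_of_lt h1, List.getElem?_eq_getElem hj,
      List.getD_eq_getElem nb 0 hj, if_neg (by omega)]
    simp
  · rcases Nat.lt_or_ge j b with h2 | h2
    · rw [List.getElem?_append_left (by simp [hlt, hlm]; omega),
        List.getElem?_append_right (by omega : (nb.take a).length ≤ j), hlt,
        List.getElem?_map, List.getElem?_take_of_lt (by omega), List.getElem?_drop,
        show a + (j - a) = j by omega, List.getElem?_eq_getElem hj,
        List.getD_eq_getElem nb 0 hj, if_pos ⟨h1, h2⟩]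
      simp
    · rw [List.getElem?_append_right (by simp [hlt, hlm]; omega)]
      simp only [List.length_append, hlt, hlm]
      rw [List.getElem?_drop, show b + (j - (a + (b - a))) = j by omega,
        List.getElem?_eq_getElem hj, List.getD_eq_getElem nb 0 hj, if_neg (by omega)]
      simp

-- one step of B computes exactly what A's set-to-zero + one-by-one redistribution computes
theorem pv_step_eq (bank : List Int) (n : Int) (i : Nat)
    (hmax : PySem.List.max? bank (fun x => x) = some n)
    (hidx : PySem.List.index? bank n = some i) :
    pvStepB bank = pvDistribA n.toNat i (bank.set i 0) := by
  obtain ⟨hi, hbi, -⟩ := PySem.List.getElem_of_index?_eq_some hidx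
  have hL : 0 < bank.length := by omega
  simp only [pvStepB, hmax, hidx]
  by_cases hn : n > 0
  · simp only [if_pos hn]
    have hn0 : (0 : Int) ≤ n := le_of_lt hn
    have hq : PySem.Int.floordiv n (bank.length : Int) = ((n.toNat / bank.length : Nat) : Int) := by
      rw [show n = ((n.toNat : Nat) : Int) from (Int.toNat_of_nonneg hn0).symm]
      exact PySem.Int.floordiv_natCast _ _
    have hr : PySem.Int.mod n (bank.length : Int) = ((n.toNat % bank.length : Nat) : Int) := by
      rw [show n = ((n.toNat : Nat) : Int) from (Int.toNat_of_nonneg hn0).symm]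
      exact PySem.Int.mod_natCast _ _
    rw [hq, hr, Int.toNat_natCast]
    set L := bank.length with hLdef
    set Q := n.toNat / L with hQdef
    set R := n.toNat % L with hRdef
    have hR : R < L := Nat.mod_lt _ hL
    set nb1 := if ((Q : Int) ≠ 0) then (bank.set i 0).map (· + (Q : Int)) else bank.set i 0
      with hnb1def
    have hnb1len : nb1.length = L := by
      rw [hnb1def]; split_ifs <;> simp [hLdef]
    have hnb1 : ∀ j, j < L → nb1.getD j 0 = (bank.set i 0).getD j 0 + (Q : Int) := by
      intro j hj
      have hjs : j < (bank.set i 0).length := by simp; omega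
      rw [hnb1def]
      split_ifs with hq0
      · rw [List.getD_eq_getElem _ 0 (by simpa using hjs), List.getElem_map,
          List.getD_eq_getElem _ 0 hjs]
      · rw [not_not.mp hq0, add_zero]
    apply List.ext_getElem?
    intro j
    by_cases hj : j < L
    · have hjs : j < (bank.set i 0).length := by simp; omega
      rw [pv_distrib_spec n.toNat i _ j hjs]
      simp only [List.length_set]
      set d := (j + L - 1 - i) % L with hd_def
      have hd : d < L := Nat.mod_lt _ hL
      rw [List.countP_congr
        (q := fun t => decide (t % L = d))
        (fun t _ => by
          simp only [decide_eq_true_eq]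
          exact pv_hit_iff L i j t hi hj), pv_count_mod L d hL hd n.toNat]
      have hdkey : d = if j ≤ i then j + L - 1 - i else j - 1 - i := by
        rw [hd_def, pv_small_mod L (j + L - 1 - i) hL (by omega)]
        split_ifs <;> omega
      by_cases hb : i + 1 + R ≤ L
      · rw [if_pos hb,
          pvBump_getElem? nb1 (i + 1) (i + 1 + R) j (by omega) (by omega) (by omega),
          hnb1 j hj]
        congr 1
        have hsum1 : (if i + 1 ≤ j ∧ j < i + 1 + R then (1 : Int) else 0)
            = (if d < R then (1 : Int) else 0) := by
          rw [hdkey]; split_ifs <;> omega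
        simp only [Nat.cast_add, Nat.cast_ite, Nat.cast_one, Nat.cast_zero]
        rw [hsum1]
        ring
      · rw [if_neg hb]
        have hin : (pvBump nb1 (i + 1) L).length = L := by
          rw [pvBump_length nb1 (i + 1) L (by omega) (by omega), hnb1len]
        rw [pvBump_getElem? _ 0 (i + 1 + R - L) j (by omega) (by omega) (by omega),
          List.getD_eq_getElem?_getD,
          pvBump_getElem? nb1 (i + 1) L j (by omega) (by omega) (by omega),
          hnb1 j hj]
        simp only [Option.getD_some]
        congr 1
        have hsum2 : (if i + 1 ≤ j ∧ j < L then (1 : Int) else 0)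
              + (if 0 ≤ j ∧ j < i + 1 + R - L then (1 : Int) else 0)
            = (if d < R then (1 : Int) else 0) := by
          rw [hdkey]; split_ifs <;> omega
        simp only [Nat.cast_add, Nat.cast_ite, Nat.cast_one, Nat.cast_zero]
        rw [← hsum2]
        ring
    · rw [List.getElem?_eq_none, List.getElem?_eq_none]
      · rw [pvDistribA_length]; simpa using hj
      · by_cases hb : i + 1 + R ≤ L
        · rw [if_pos hb, pvBump_length nb1 (i + 1) (i + 1 + R) (by omega) (by omega), hnb1len]
          omega
        · rw [if_neg hb,
            pvBump_length _ 0 (i + 1 + R - L) (by omega)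
              (by rw [pvBump_length nb1 (i + 1) L (by omega) (by omega), hnb1len]; omega),
            pvBump_length nb1 (i + 1) L (by omega) (by omega), hnb1len]
          omega
  · simp only [if_neg hn]
    have hnt : n.toNat = 0 := by omega
    rw [hnt]
    rfl


-- the two loops run in lockstep: same seen-set, same history, steps = len(banks)
theorem pv_loop_eq : ∀ (f : Nat) (seenA : PySem.Set (List Int)) (seenB : PySem.Dict (List Int) Bool)
    (banks : List (List Int)) (steps : Int) (bank : List Int),
    bank ≠ [] →
    steps = (banks.length : Int) →
    (∀ x : List Int, PySem.Set.contains seenA x = seenB.contains x) →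
    PySem.Set.contains seenA bank = false →
    pvLoopA f seenA banks steps bank = pvLoopB f seenB banks bank := by
  intro f
  induction f with
  | zero =>
    intro seenA seenB banks steps bank hne hsteps hseen hmem
    rw [pvLoopA, pvLoopB, ← hseen, hmem]
    simp [hsteps]
  | succ f ih =>
    intro seenA seenB banks steps bank hne hsteps hseen hmem
    obtain ⟨n, hmax⟩ : ∃ n, PySem.List.max? bank (fun x => x) = some n := by
      cases h : PySem.List.max? bank (fun x => x) with
      | none => exact absurd ((PySem.List.max?_eq_none_iff bank (fun x => x)).mp h) hne
      | some n => exact ⟨n, rfl⟩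
    obtain ⟨i, hidx⟩ : ∃ i, PySem.List.index? bank n = some i := by
      have hmemn : n ∈ bank := PySem.List.max?_mem hmax
      cases h : PySem.List.index? bank n with
      | none => exact absurd hmemn ((PySem.List.index?_eq_none_iff bank n).mp h)
      | some i => exact ⟨i, rfl⟩
    have hstep := pv_step_eq bank n i hmax hidx
    have hlen : (pvDistribA n.toNat i (bank.set i 0)).length = bank.length := by
      rw [pvDistribA_length]; simp
    have hne' : pvDistribA n.toNat i (bank.set i 0) ≠ [] := by
      intro h
      rw [h] at hlen
      exact hne (List.length_eq_zero_iff.mp hlen.symm)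
    have hseen' : ∀ x : List Int,
        PySem.Set.contains (PySem.Set.add seenA bank) x = (seenB.insert bank true).contains x := by
      intro x
      rw [Bool.eq_iff_iff, PySem.Set.contains_iff, PySem.Set.mem_add, PySem.Dict.contains_insert]
      rw [Bool.or_eq_true, beq_iff_eq, ← hseen, PySem.Set.contains_iff]
      tauto
    rw [pvLoopA, pvLoopB, ← hseen, hmem]
    simp only [hmax, hidx, Bool.false_eq_true, if_false, hstep]
    by_cases hc : PySem.Set.contains (PySem.Set.add seenA bank) (pvDistribA n.toNat i (bank.set i 0)) = true
    · rw [if_pos hc, pvLoopB.eq_def, ← hseen', hc]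
      simp only [if_true]
      refine Prod.ext rfl ?_
      simp only [List.length_append, List.length_cons, List.length_nil]
      push_cast [hsteps]
      ring
    · rw [if_neg hc, ih _ _ _ _ _ hne' (by push_cast [hsteps]; simp) hseen'
        (Bool.eq_false_iff.mpr hc)]

-- ===== VERDICT (by name: the statement is the Claim_ definition above) =====
theorem infinite_loop_spec : Claim_equal_infinite_loop := by
  intro bank _ hpre
  unfold Spec_infinite_loop infinite_loop infinite_loop_alt
  exact pv_loop_eq (pvFuel bank) PySem.Set.empty PySem.Dict.empty [] 0 bank hpre (by simp)
    (fun x => by simp [PySem.Set.empty, PySem.Set.contains, PySem.Dict.contains_empty])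
    (by simp [PySem.Set.empty, PySem.Set.contains])
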